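-- pv_equiv track=rewrite | github.com/JoshuaSamuelTheCoder/Quarantine | Meetings/main.py | flattenAndCombine
-- ===== SOURCE A (Python) =====
-- def flattenAndCombine(lst1, dailyBound):
--     new_lst = [["0:00", dailyBound[0]]]
--     i = 0
--     j = 1
--     while i < len(lst1):
--         if i+j-1 <len(lst1) and i+j < len(lst1) and lst1[i+j-1][1] == lst1[i+j][0]:
--             j += 1
--             continue;
--         elif j > 1:
--             new_lst.append([lst1[i][0], lst1[i+j-1][1]])
--             i += j - 1
--             j = 1
--         else:
--             new_lst.append(lst1[i])
--         i += 1
--     new_lst.append([dailyBound[1], "24:00"])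
--     return new_lst
-- ===== SOURCE B (Python) =====
-- def flattenAndCombine(lst1, dailyBound):
--     merged = []
--     for iv in lst1:
--         if merged and merged[-1][1] == iv[0]:
--             merged[-1] = [merged[-1][0], iv[1]]
--         else:
--             merged.append(iv)
--     return [["0:00", dailyBound[0]]] + merged + [[dailyBound[1], "24:00"]]
-- ===== Notes on version B (the rewrite author's own statement) =====
-- stated objective: simpler
-- what changed: Replaced A's lookahead two-pointer scan (indices i,j with jump arithmetic) by a single lookback pass that extends the tail of a separately built 'merged' list, wrapping the daily bounds afterwards.
import Mathlib
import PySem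

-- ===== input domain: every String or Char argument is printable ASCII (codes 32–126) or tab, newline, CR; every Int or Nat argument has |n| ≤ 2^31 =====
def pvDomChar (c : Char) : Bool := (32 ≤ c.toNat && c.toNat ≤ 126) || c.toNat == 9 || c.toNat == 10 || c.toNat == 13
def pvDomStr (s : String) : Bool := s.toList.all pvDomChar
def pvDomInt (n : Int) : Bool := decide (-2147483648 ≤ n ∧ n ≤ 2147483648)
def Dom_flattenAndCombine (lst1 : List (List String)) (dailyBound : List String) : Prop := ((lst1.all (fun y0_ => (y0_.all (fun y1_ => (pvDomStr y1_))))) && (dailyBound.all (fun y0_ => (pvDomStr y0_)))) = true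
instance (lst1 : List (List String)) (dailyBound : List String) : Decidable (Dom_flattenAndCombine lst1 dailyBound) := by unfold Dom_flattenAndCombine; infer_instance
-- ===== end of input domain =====

-- B replaces A's lookahead two-pointer scan by a single lookback pass extending the tail of a
-- separately built merged list (objective: simpler).  Equivalence is about the return value.

-- ===== PORT A =====
-- `pvA2 lst k m` = Python `lst[k][m]` (defaulting; indices are in range on every access A makes inside Pre_).
def pvA2 (lst : List (List String)) (k m : Nat) : String := (lst.getD k []).getD m ""

-- the while loop of A: state (new_lst tail = acc, i, j)
def aLoop (lst : List (List String)) (acc : List (List String)) (i j : Nat) : List (List String) :=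
  if h : i < lst.length then
    if hc : i + j - 1 < lst.length ∧ i + j < lst.length ∧ pvA2 lst (i + j - 1) 1 = pvA2 lst (i + j) 0 then
      aLoop lst acc i (j + 1)
    else if 1 < j then
      aLoop lst (acc ++ [[pvA2 lst i 0, pvA2 lst (i + j - 1) 1]]) (i + j - 1 + 1) 1
    else
      aLoop lst (acc ++ [lst.getD i []]) (i + 1) 1
  else acc
termination_by (lst.length - i, lst.length - j)
decreasing_by
  · apply Prod.Lex.right; omega
  · apply Prod.Lex.left; omega
  · apply Prod.Lex.left; omega

def flattenAndCombine (lst1 : List (List String)) (dailyBound : List String) : List (List String) :=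
  aLoop lst1 [["0:00", dailyBound.getD 0 ""]] 0 1 ++ [[dailyBound.getD 1 "", "24:00"]]

-- ===== PORT B =====
-- one step of B's for-loop: look back at merged[-1]
def bStep (m : List (List String)) (iv : List String) : List (List String) :=
  match m.getLast? with
  | some last =>
      if last.getD 1 "" = iv.getD 0 "" then m.dropLast ++ [[last.getD 0 "", iv.getD 1 ""]]
      else m ++ [iv]
  | none => m ++ [iv]

def flattenAndCombine_alt (lst1 : List (List String)) (dailyBound : List String) : List (List String) :=
  [["0:00", dailyBound.getD 0 ""]] ++ lst1.foldl bStep [] ++ [[dailyBound.getD 1 "", "24:00"]]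

-- ===== PRECONDITION & SPEC =====
-- Pre_ is exactly the set of inputs on which the Python A returns (elsewhere it raises IndexError):
-- dailyBound needs two entries; every interval but the last needs two entries; a last interval of
-- several needs one entry, and two entries if the value comparison would merge it into its predecessor.
def Pre_flattenAndCombine (lst1 : List (List String)) (dailyBound : List String) : Prop :=
  2 ≤ dailyBound.length ∧ (∀ iv ∈ lst1.dropLast, 2 ≤ iv.length) ∧
    (lst1.length ≤ 1 ∨
      (1 ≤ (lst1.getLastD []).length ∧
        (2 ≤ (lst1.getLastD []).length ∨
          (lst1.getD (lst1.length - 2) []).getD 1 "" ≠ (lst1.getLastD []).getD 0 "")))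
instance (lst1 : List (List String)) (dailyBound : List String) : Decidable (Pre_flattenAndCombine lst1 dailyBound) := by unfold Pre_flattenAndCombine; infer_instance

def pvWitness_flattenAndCombine : List (List String) × List String :=
  ([["1:00", "2:00"], ["2:00", "3:00"], ["5:00", "6:00"]], ["8:00", "22:00"])

def Spec_flattenAndCombine (lst1 : List (List String)) (dailyBound : List String) (out : List (List String)) : Prop := out = flattenAndCombine_alt lst1 dailyBound
instance (lst1 : List (List String)) (dailyBound : List String) (out : List (List String)) : Decidable (Spec_flattenAndCombine lst1 dailyBound out) := by unfold Spec_flattenAndCombine; infer_instance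

-- ===== CLAIM (what is proved, stated in full; the proofs are below) =====
def Claim_equal_flattenAndCombine : Prop := ∀ (lst1 : List (List String)) (dailyBound : List String), Dom_flattenAndCombine lst1 dailyBound → Pre_flattenAndCombine lst1 dailyBound → Spec_flattenAndCombine lst1 dailyBound (flattenAndCombine lst1 dailyBound)

-- ===== LEMMAS AND PROOFS =====

-- canonical head-carrying merge both loops compute
def mrg (cur : List String) : List (List String) → List (List String)
  | [] => [cur]
  | y :: rest =>
      if cur.getD 1 "" = y.getD 0 "" then mrg [cur.getD 0 "", y.getD 1 ""] rest
      else cur :: mrg y rest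

-- the interval A is currently accumulating (group start i, lookahead j)
def cmb (lst : List (List String)) (i j : Nat) : List String :=
  if j = 1 then lst.getD i [] else [pvA2 lst i 0, pvA2 lst (i + j - 1) 1]

theorem cmb_getD0 (lst : List (List String)) (i j : Nat) : (cmb lst i j).getD 0 "" = pvA2 lst i 0 := by
  unfold cmb pvA2; split <;> simp

theorem cmb_getD1 (lst : List (List String)) (i j : Nat) (hj : 1 ≤ j) :
    (cmb lst i j).getD 1 "" = pvA2 lst (i + j - 1) 1 := by
  unfold cmb pvA2
  split
  · subst ‹j = 1›; simp
  · simp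

theorem drop_eq_getD_cons (lst : List (List String)) (n : Nat) (h : n < lst.length) :
    lst.drop n = lst.getD n [] :: lst.drop (n + 1) := by
  rw [List.drop_eq_getElem_cons h, List.getD_eq_getElem lst [] h]

theorem aLoop_eq (lst : List (List String)) (acc : List (List String)) (i j : Nat) :
    i < lst.length → 1 ≤ j → i + j ≤ lst.length →
    (∀ k, i ≤ k → k + 1 < i + j → pvA2 lst k 1 = pvA2 lst (k + 1) 0) →
    aLoop lst acc i j = acc ++ mrg (cmb lst i j) (lst.drop (i + j)) := by
  induction acc, i, j using aLoop.induct (lst := lst) with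
  | case1 acc i j h hc ih =>
    intro h1 hj h2 hchain
    have hc' : i + j - 1 < lst.length ∧ i + j < lst.length ∧ pvA2 lst (i + j - 1) 1 = pvA2 lst (i + j) 0 := hc
    clear hc
    rw [aLoop, dif_pos h1, dif_pos hc']
    rw [ih h (by omega) (by omega) (by intro k hk1 hk2; rcases Nat.lt_or_ge (k+1) (i+j) with hlt | hge
                                       · exact hchain k hk1 hlt
                                       · have : k = i + j - 1 := by omega
                                         subst this
                                         have : i + j - 1 + 1 = i + j := by omega
                                         rw [this]; exact hc'.2.2)]
    rw [drop_eq_getD_cons lst (i+j) hc'.2.1]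
    rw [mrg]
    rw [cmb_getD1 lst i j hj, cmb_getD0]
    have hcomp : pvA2 lst (i + j - 1) 1 = (lst.getD (i+j) []).getD 0 "" := hc'.2.2
    rw [if_pos hcomp]
    have he : ([pvA2 lst i 0, (lst.getD (i + j) []).getD 1 ""] : List String) = cmb lst i (j+1) := by
      unfold cmb pvA2
      rw [if_neg (by omega : ¬ j + 1 = 1)]
      have e : i + (j + 1) - 1 = i + j := by omega
      rw [e]
    rw [he]
    have e5 : i + (j + 1) = i + j + 1 := by omega
    rw [e5]
  | case2 acc i j h hc hj ih =>
    intro h1 hjj h2 hchain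
    have hc' : ¬(i + j - 1 < lst.length ∧ i + j < lst.length ∧ pvA2 lst (i + j - 1) 1 = pvA2 lst (i + j) 0) := hc
    clear hc
    rw [aLoop, dif_pos h1, dif_neg hc', if_pos hj]
    rcases Nat.lt_or_ge (i + j) lst.length with hlt | hge
    · -- comparison must be false
      have hne : pvA2 lst (i + j - 1) 1 ≠ pvA2 lst (i + j) 0 := by
        intro heq; exact hc' ⟨by omega, hlt, heq⟩
      rw [ih (by omega) (by omega) (by omega) (by intro k hk1 hk2; omega)]
      · rw [drop_eq_getD_cons lst (i+j) hlt, mrg,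
            cmb_getD1 lst i j (by omega)]
        rw [if_neg (by unfold pvA2 at hne ⊢; exact hne)]
        have e1 : i + j - 1 + 1 = i + j := by omega
        rw [e1]
        have e2 : cmb lst (i + j) 1 = lst.getD (i + j) [] := by unfold cmb; simp
        have e3 : cmb lst i j = [pvA2 lst i 0, pvA2 lst (i + j - 1) 1] := by
          unfold cmb; rw [if_neg (by omega)]
        rw [e2, e3]
        have e4 : i + j + 1 = i + j - 1 + 1 + 1 := by omega
        rw [e4]
        simp
    · -- the call runs off the end
      have hstop : ¬ i + j - 1 + 1 < lst.length := by omega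
      rw [aLoop, dif_neg hstop]
      have : lst.drop (i + j) = [] := List.drop_eq_nil_of_le (by omega)
      rw [this, mrg]
      have : cmb lst i j = [pvA2 lst i 0, pvA2 lst (i + j - 1) 1] := by
        unfold cmb; rw [if_neg (by omega)]
      rw [this]
  | case3 acc i j h hc hj ih =>
    intro h1 hj1 h2 hchain
    have hjeq : j = 1 := by omega
    subst hjeq
    have hc' : ¬(i + 1 - 1 < lst.length ∧ i + 1 < lst.length ∧ pvA2 lst (i + 1 - 1) 1 = pvA2 lst (i + 1) 0) := hc
    clear hc
    rw [aLoop, dif_pos h1, dif_neg hc', if_neg (by omega)]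
    have e0 : cmb lst i 1 = lst.getD i [] := by unfold cmb; simp
    rcases Nat.lt_or_ge (i + 1) lst.length with hlt | hge
    · have hne : pvA2 lst i 1 ≠ pvA2 lst (i + 1) 0 := by
        intro heq; exact hc' ⟨by omega, by omega, by simpa using heq⟩
      rw [ih (by omega) (by omega) (by omega) (by intro k hk1 hk2; omega)]
      rw [drop_eq_getD_cons lst (i+1) hlt, mrg, e0]
      rw [if_neg (by unfold pvA2 at hne; simpa using hne)]
      have e2 : cmb lst (i + 1) 1 = lst.getD (i + 1) [] := by unfold cmb; simp
      rw [e2]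
      simp
    · have hstop : ¬ i + 1 < lst.length := by omega
      rw [aLoop, dif_neg hstop]
      have : lst.drop (i + 1) = [] := List.drop_eq_nil_of_le (by omega)
      rw [this, mrg, e0]
  | case4 acc i j h =>
    intro h1
    exact absurd h1 (by exact_mod_cast h)

theorem foldl_bStep (l : List (List String)) :
    ∀ (m : List (List String)) (cur : List String),
      List.foldl bStep (m ++ [cur]) l = m ++ mrg cur l := by
  induction l with
  | nil => intro m cur; simp [mrg]
  | cons y rest ih =>
    intro m cur
    rw [List.foldl_cons]
    have hstep : bStep (m ++ [cur]) y =
        if cur.getD 1 "" = y.getD 0 "" then m ++ [[cur.getD 0 "", y.getD 1 ""]]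
        else (m ++ [cur]) ++ [y] := by
      unfold bStep
      rw [List.getLast?_concat]
      simp
    rw [hstep]
    split
    · rw [ih m [cur.getD 0 "", y.getD 1 ""], mrg, if_pos ‹_›]
    · rw [ih (m ++ [cur]) y, mrg, if_neg ‹_›]
      simp

-- ===== VERDICT (by name: the statement is the Claim_ definition above) =====
theorem flattenAndCombine_spec : Claim_equal_flattenAndCombine := by
  intro lst1 dailyBound _ _
  unfold Spec_flattenAndCombine flattenAndCombine flattenAndCombine_alt
  cases lst1 with
  | nil => rw [aLoop]; simp
  | cons x rest =>
    rw [aLoop_eq (x :: rest) _ 0 1 (by simp) (by omega) (by simp) (by intro k hk1 hk2; omega)]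
    have e0 : cmb (x :: rest) 0 1 = x := by unfold cmb; simp
    have e1 : (x :: rest).drop 1 = rest := by simp
    rw [e0, e1]
    have e2 : List.foldl bStep [] (x :: rest) = [] ++ mrg x rest := by
      rw [List.foldl_cons]
      have : bStep [] x = [] ++ [x] := by unfold bStep; simp
      rw [this]
      exact foldl_bStep rest [] x
    rw [e2]
    simp
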